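-- pv_equiv track=rewrite | github.com/ariecattan/coref | model_utils.py | split_doc_into_segments
-- ===== SOURCE A (Python) =====
-- def split_doc_into_segments(bert_tokens, sentence_ids, segment_length=512, with_special_tokens=True):
--     segments = [0]
--     current_token = 0
--     if with_special_tokens:
--         segment_length -= 2
--     while current_token < len(bert_tokens):
--         end_token = min(len(bert_tokens) - 1, current_token + segment_length - 1)
--         sentence_end = sentence_ids[end_token]
--         if end_token != len(bert_tokens) - 1 and sentence_ids[end_token + 1] == sentence_end:
--             while end_token >= current_token and sentence_ids[end_token] == sentence_end:
--                 end_token -= 1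
--
--             if end_token < current_token:
--                 raise ValueError(bert_tokens)
--
--         current_token = end_token + 1
--         segments.append(current_token)
--
--     return segments
-- ===== SOURCE B (Python) =====
-- def split_doc_into_segments(bert_tokens, sentence_ids, segment_length=512, with_special_tokens=True):
--     n = len(bert_tokens)
--     length = segment_length - 2 if with_special_tokens else segment_length
--     # one O(n) pass: run_start[i] = index where the run of equal sentence ids containing i begins
--     run_start = [0] * n
--     for i in range(1, n):
--         run_start[i] = i if sentence_ids[i] != sentence_ids[i - 1] else run_start[i - 1]
--     segments = [0]
--     current = 0
--     while current < n:
--         end = min(n, current + length)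
--         if end == n or sentence_ids[end] != sentence_ids[end - 1]:
--             cut = end
--         else:
--             cut = run_start[end - 1]
--         if cut <= current:
--             raise ValueError(bert_tokens)
--         current = cut
--         segments.append(current)
--     return segments
-- ===== Notes on version B (the rewrite author's own statement) =====
-- stated objective: alternative
-- what changed: B precomputes in one pass a run_start table (run_start[i] = index where the run of equal sentence ids containing i begins), so each segment cut is an O(1) table lookup instead of A's per-segment backward scan over sentence_ids.
import Mathlib
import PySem

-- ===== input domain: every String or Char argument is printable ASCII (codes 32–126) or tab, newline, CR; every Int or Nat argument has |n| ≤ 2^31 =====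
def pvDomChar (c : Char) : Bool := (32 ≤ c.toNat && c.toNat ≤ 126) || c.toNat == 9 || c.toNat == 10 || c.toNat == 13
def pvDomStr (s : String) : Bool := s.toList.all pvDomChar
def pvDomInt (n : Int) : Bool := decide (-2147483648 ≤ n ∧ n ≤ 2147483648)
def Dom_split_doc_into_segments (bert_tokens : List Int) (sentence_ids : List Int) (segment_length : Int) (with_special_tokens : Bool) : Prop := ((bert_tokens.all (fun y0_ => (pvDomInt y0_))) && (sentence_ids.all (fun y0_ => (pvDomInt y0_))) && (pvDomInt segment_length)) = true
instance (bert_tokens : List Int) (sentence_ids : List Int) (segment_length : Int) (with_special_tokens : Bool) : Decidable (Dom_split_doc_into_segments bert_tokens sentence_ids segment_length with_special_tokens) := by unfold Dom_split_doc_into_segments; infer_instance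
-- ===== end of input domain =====

-- B replaces A's per-segment backward scan for a sentence boundary with a run-start table
-- precomputed in one pass, so each segment cut becomes an O(1) lookup (objective: alternative).

-- ===== PORT A =====
-- inner loop `while end_token >= current_token and sentence_ids[end_token] == sentence_end: end_token -= 1`
-- (fuel bounds the number of decrements; under Pre_ all indices read are in range, so pyGetD's default is never used)
def pvBackA (ids : List Int) (c v : Int) : Int → Nat → Int
  | e, 0 => e
  | e, fuel+1 =>
    if c ≤ e ∧ PySem.List.pyGetD ids e 0 = v then pvBackA ids c v (e-1) fuel else e

-- one iteration of A's outer while-loop: `none` = the `raise ValueError` path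
def pvStepA (toks ids : List Int) (c L : Int) : Option Int :=
  let n : Int := toks.length
  let e0 : Int := min (n - 1) (c + L - 1)
  let v : Int := PySem.List.pyGetD ids e0 0
  if e0 ≠ n - 1 ∧ PySem.List.pyGetD ids (e0 + 1) 0 = v then
    let e := pvBackA ids c v e0 (e0 + 2).toNat
    if e < c then none else some (e + 1)
  else some (e0 + 1)

-- outer `while current_token < len(bert_tokens)` loop (fuel n+1 suffices: each step advances current_token)
def pvLoopA (toks ids : List Int) (L : Int) : Nat → Int → List Int → List Int
  | 0, _, segs => segs
  | fuel+1, c, segs =>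
    if c < (toks.length : Int) then
      match pvStepA toks ids c L with
      | none => segs            -- Python: raise ValueError (excluded by Pre_)
      | some c' => pvLoopA toks ids L fuel c' (segs ++ [c'])
    else segs

def split_doc_into_segments (bert_tokens : List Int) (sentence_ids : List Int) (segment_length : Int) (with_special_tokens : Bool) : List Int :=
  pvLoopA bert_tokens sentence_ids
    (if with_special_tokens then segment_length - 2 else segment_length)
    (bert_tokens.length + 1) 0 [0]

-- ===== PORT B =====
-- `run_start[i] = i if sentence_ids[i] != sentence_ids[i-1] else run_start[i-1]` for i in range(1, n)
-- (i.toNat is exact: every i produced by range(1, n) is ≥ 1)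
def pvRunStart (ids : List Int) (n : Nat) : List Int :=
  (PySem.List.pyRange 1 (n : Int)).foldl
    (fun rs i =>
      rs.set i.toNat
        (if PySem.List.pyGetD ids i 0 ≠ PySem.List.pyGetD ids (i-1) 0 then i
         else PySem.List.pyGetD rs (i-1) 0))
    (List.replicate n 0)

-- one iteration of B's while-loop: `none` = the `raise ValueError` path
def pvStepB (n : Nat) (ids rs : List Int) (c L : Int) : Option Int :=
  let e : Int := min (n : Int) (c + L)
  let cut : Int :=
    if e = (n : Int) ∨ PySem.List.pyGetD ids e 0 ≠ PySem.List.pyGetD ids (e-1) 0 then e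
    else PySem.List.pyGetD rs (e-1) 0
  if cut ≤ c then none else some cut

def pvLoopB (n : Nat) (ids rs : List Int) (L : Int) : Nat → Int → List Int → List Int
  | 0, _, segs => segs
  | fuel+1, c, segs =>
    if c < (n : Int) then
      match pvStepB n ids rs c L with
      | none => segs            -- Python: raise ValueError (excluded by Pre_)
      | some c' => pvLoopB n ids rs L fuel c' (segs ++ [c'])
    else segs

def split_doc_into_segments_alt (bert_tokens : List Int) (sentence_ids : List Int) (segment_length : Int) (with_special_tokens : Bool) : List Int :=
  pvLoopB bert_tokens.length sentence_ids (pvRunStart sentence_ids bert_tokens.length)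
    (if with_special_tokens then segment_length - 2 else segment_length)
    (bert_tokens.length + 1) 0 [0]

-- ===== PRECONDITION & SPEC =====
-- Pre_ excludes exactly the inputs where the Python A does not return normally: with a nonempty
-- token list it raises IndexError when sentence_ids is shorter than bert_tokens, diverges when the
-- effective segment length is < 1, and raises ValueError when some run of equal sentence ids is
-- longer than the effective segment length (the third conjunct says every window of length L+1
-- inside the first n ids contains two different ids).
def Pre_split_doc_into_segments (bert_tokens : List Int) (sentence_ids : List Int) (segment_length : Int) (with_special_tokens : Bool) : Prop :=
  bert_tokens.length = 0 ∨
    (1 ≤ (if with_special_tokens then segment_length - 2 else segment_length) ∧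
     bert_tokens.length ≤ sentence_ids.length ∧
     ∀ i < bert_tokens.length,
       i + (if with_special_tokens then segment_length - 2 else segment_length).toNat < bert_tokens.length →
       ∃ k < (if with_special_tokens then segment_length - 2 else segment_length).toNat + 1,
         sentence_ids.getD (i + k) 0 ≠ sentence_ids.getD i 0)
instance (bert_tokens : List Int) (sentence_ids : List Int) (segment_length : Int) (with_special_tokens : Bool) : Decidable (Pre_split_doc_into_segments bert_tokens sentence_ids segment_length with_special_tokens) := by unfold Pre_split_doc_into_segments; infer_instance

def pvWitness_split_doc_into_segments : List Int × List Int × Int × Bool := ([1, 2, 3, 4, 5], [0, 0, 1, 1, 2], 4, true)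

def Spec_split_doc_into_segments (bert_tokens : List Int) (sentence_ids : List Int) (segment_length : Int) (with_special_tokens : Bool) (out : List Int) : Prop := out = split_doc_into_segments_alt bert_tokens sentence_ids segment_length with_special_tokens
instance (bert_tokens : List Int) (sentence_ids : List Int) (segment_length : Int) (with_special_tokens : Bool) (out : List Int) : Decidable (Spec_split_doc_into_segments bert_tokens sentence_ids segment_length with_special_tokens out) := by unfold Spec_split_doc_into_segments; infer_instance

-- ===== CLAIM (what is proved, stated in full; the proofs are below) =====
def Claim_equal_split_doc_into_segments : Prop := ∀ (bert_tokens : List Int) (sentence_ids : List Int) (segment_length : Int) (with_special_tokens : Bool), Dom_split_doc_into_segments bert_tokens sentence_ids segment_length with_special_tokens → Pre_split_doc_into_segments bert_tokens sentence_ids segment_length with_special_tokens → Spec_split_doc_into_segments bert_tokens sentence_ids segment_length with_special_tokens (split_doc_into_segments bert_tokens sentence_ids segment_length with_special_tokens)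

-- ===== LEMMAS AND PROOFS =====

-- specification of Python B's run_start table: start index of the run of equal ids containing e
def pvRStart (ids : List Int) : Nat → Nat
  | 0 => 0
  | e+1 => if PySem.List.pyGetD ids ((e : Int) + 1) 0 ≠ PySem.List.pyGetD ids (e : Int) 0 then e+1 else pvRStart ids e

lemma pvRStart_le (ids : List Int) : ∀ e : Nat, pvRStart ids e ≤ e := by
  intro e
  induction e with
  | zero => simp [pvRStart]
  | succ e ih => simp only [pvRStart]; split <;> omega

-- A's backward scan lands one before the start of the current run (floored at c-1)
lemma pvBackA_succ (ids : List Int) (c v e : Int) (fuel : Nat) :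
    pvBackA ids c v e (fuel+1)
      = if c ≤ e ∧ PySem.List.pyGetD ids e 0 = v then pvBackA ids c v (e-1) fuel else e := rfl

-- A's backward scan lands one before the start of the current run (floored at c-1)
lemma pvBackA_eq (ids : List Int) (c : Int) (hc : 0 ≤ c) :
    ∀ e : Nat, c - 1 ≤ (e : Int) →
      pvBackA ids c (PySem.List.pyGetD ids (e : Int) 0) (e : Int) (e + 2)
        = max c ((pvRStart ids e : Int)) - 1 := by
  intro e
  induction e with
  | zero =>
    intro hce
    rw [pvBackA_succ]
    by_cases h0 : c ≤ (((0:Nat)) : Int)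
    · rw [if_pos ⟨h0, rfl⟩, pvBackA_succ, if_neg (by intro h; have := h.1; omega)]
      simp only [pvRStart]
      omega
    · rw [if_neg (fun h => h0 h.1)]
      simp only [pvRStart]
      omega
  | succ e ih =>
    intro hce
    rw [pvBackA_succ, ]
    by_cases hle : c ≤ (((e+1:Nat)) : Int)
    · rw [if_pos ⟨hle, rfl⟩]
      have harg : (((e+1:Nat)) : Int) - 1 = (e : Int) := by push_cast; ring
      rw [harg]
      have hcast1 : ((e : Int) + 1) = (((e+1:Nat)) : Int) := by push_cast; ring
      by_cases hid : PySem.List.pyGetD ids (e : Int) 0 = PySem.List.pyGetD ids (((e+1:Nat)) : Int) 0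
      · have hr : pvRStart ids (e+1) = pvRStart ids e := by
          simp only [pvRStart]
          rw [if_neg]
          rw [hcast1]
          exact not_ne_iff.mpr hid.symm
        rw [← hid, ih (by omega), hr]
      · rw [pvBackA_succ, if_neg (fun h => hid h.2)]
        have hr : pvRStart ids (e+1) = e+1 := by
          simp only [pvRStart]
          rw [if_pos]
          rw [hcast1]
          exact fun h => hid h.symm
        rw [hr]
        push_cast
        omega
    · rw [if_neg (fun h => hle h.1)]
      have := pvRStart_le ids (e+1)
      push_cast
      omega

-- the run_start table holds pvRStart at every index < n
lemma pvRunStart_aux (ids : List Int) (n : Nat) :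
    ∀ m, m ≤ n →
      ((PySem.List.pyRange 1 (m : Int)).foldl
        (fun rs i =>
          rs.set i.toNat
            (if PySem.List.pyGetD ids i 0 ≠ PySem.List.pyGetD ids (i-1) 0 then i
             else PySem.List.pyGetD rs (i-1) 0))
        (List.replicate n 0)).length = n ∧
      ∀ j, j < n →
        ((PySem.List.pyRange 1 (m : Int)).foldl
          (fun rs i =>
            rs.set i.toNat
              (if PySem.List.pyGetD ids i 0 ≠ PySem.List.pyGetD ids (i-1) 0 then i
               else PySem.List.pyGetD rs (i-1) 0))
          (List.replicate n 0)).getD j 0 = if j < m then (pvRStart ids j : Int) else 0 := by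
  intro m
  induction m with
  | zero =>
    intro _
    have he : PySem.List.pyRange 1 ((0 : Nat) : Int) = [] := by decide
    rw [he]
    refine ⟨by simp, ?_⟩
    intro j hj
    simp [List.getD, hj]
  | succ m ih =>
    intro hmn
    rcases Nat.eq_zero_or_pos m with hm0 | hmpos
    · subst hm0
      have he : PySem.List.pyRange 1 ((1 : Nat) : Int) = [] := by decide
      rw [he]
      constructor
      · simp
      · intro j hj
        simp only [List.foldl_nil]
        by_cases hj1 : j < 1
        · interval_cases j
          simp [List.getD, hj, pvRStart]
        · simp [List.getD, hj, hj1]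
    · have hsplit : PySem.List.pyRange 1 ((m + 1 : Nat) : Int)
          = PySem.List.pyRange 1 ((m : Nat) : Int) ++ [(m : Int)] := by
        have : ((m + 1 : Nat) : Int) = (m : Int) + 1 := by push_cast; ring
        rw [this]
        exact PySem.List.pyRange_one_succ_right (by exact_mod_cast hmpos)
      obtain ⟨ihlen, ihget⟩ := ih (by omega)
      rw [hsplit, List.foldl_append]
      set prev := (PySem.List.pyRange 1 ((m : Nat) : Int)).foldl
          (fun rs i =>
            rs.set i.toNat
              (if PySem.List.pyGetD ids i 0 ≠ PySem.List.pyGetD ids (i-1) 0 then i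
               else PySem.List.pyGetD rs (i-1) 0))
          (List.replicate n 0) with hprev
      simp only [List.foldl_cons, List.foldl_nil]
      have hm1 : ((m : Int) - 1) = ((m - 1 : Nat) : Int) := by
        push_cast [hmpos]
        omega
      have hval :
          (if PySem.List.pyGetD ids (m : Int) 0 ≠ PySem.List.pyGetD ids ((m : Int)-1) 0 then (m : Int)
           else PySem.List.pyGetD prev ((m : Int)-1) 0) = (pvRStart ids m : Int) := by
        have hrs : pvRStart ids m
            = if PySem.List.pyGetD ids (((m-1 : Nat) : Int) + 1) 0 ≠ PySem.List.pyGetD ids ((m-1 : Nat) : Int) 0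
              then (m-1)+1 else pvRStart ids (m-1) := by
          conv_lhs => rw [show m = (m-1)+1 by omega]
          simp [pvRStart]
        have hidx : ((m-1 : Nat) : Int) + 1 = (m : Int) := by push_cast [hmpos]; omega
        rw [hm1]
        rw [PySem.List.pyGetD_natCast prev (m-1) 0, ihget (m-1) (by omega)]
        rw [hrs, hidx]
        split
        · push_cast [hmpos]; omega
        · simp [show m - 1 < m from by omega]
      rw [hval]
      constructor
      · simpa using ihlen
      · intro j hj
        have hmt : ((m : Int)).toNat = m := by simp
        rw [hmt]
        simp only [List.getD, List.getElem?_set]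
        by_cases hjm : m = j
        · subst hjm
          simp [ihlen, hj]
        · rw [if_neg hjm]
          have := ihget j hj
          simp only [List.getD] at this
          rw [this]
          by_cases h1 : j < m
          · simp [h1, show j < m + 1 from by omega]
          · simp [h1, show ¬ j < m + 1 from by omega]

lemma pvRunStart_getD (ids : List Int) (n : Nat) (j : Nat) (hj : j < n) :
    PySem.List.pyGetD (pvRunStart ids n) (j : Int) 0 = (pvRStart ids j : Int) := by
  obtain ⟨_, hget⟩ := pvRunStart_aux ids n n le_rfl
  rw [pvRunStart, PySem.List.pyGetD_natCast, hget j hj]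
  simp [hj]

-- one step of A computes the same cut (and the same raise condition) as one step of B
lemma step_eq (toks ids : List Int) (L c : Int) (hL : 1 ≤ L) (hc : 0 ≤ c)
    (hcn : c < (toks.length : Int)) :
    pvStepA toks ids c L = pvStepB toks.length ids (pvRunStart ids toks.length) c L := by
  simp only [pvStepA, pvStepB]
  set N : Int := (toks.length : Int) with hN
  set e : Int := min N (c + L) with he
  have he0 : min (N - 1) (c + L - 1) = e - 1 := by omega
  rw [he0, show e - 1 + 1 = e by ring]
  by_cases hEn : e = N
  · -- last segment: both cut at n
    rw [if_neg (show ¬(e - 1 ≠ N - 1 ∧ PySem.List.pyGetD ids e 0 = PySem.List.pyGetD ids (e-1) 0)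
          from fun h => h.1 (by omega)),
        if_pos (Or.inl hEn), if_neg (show ¬ e ≤ c by omega)]
  · have heN : e < N := by omega
    have hecL : e = c + L := by omega
    by_cases hid : PySem.List.pyGetD ids e 0 = PySem.List.pyGetD ids (e - 1) 0
    · -- window end inside a sentence: A backtracks, B reads the run_start table
      rw [if_pos (show e - 1 ≠ N - 1 ∧ PySem.List.pyGetD ids e 0 = PySem.List.pyGetD ids (e-1) 0
            from ⟨by omega, hid⟩),
          if_neg (show ¬(e = N ∨ PySem.List.pyGetD ids e 0 ≠ PySem.List.pyGetD ids (e-1) 0)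
            from by rw [not_or, not_ne_iff]; exact ⟨hEn, hid⟩)]
      set eN : Nat := (e - 1).toNat with heNat
      have hcast : ((eN : Nat) : Int) = e - 1 := Int.toNat_of_nonneg (by omega)
      rw [show (e - 1 + 2).toNat = eN + 2 by omega, ← hcast]
      have hback := pvBackA_eq ids c hc eN (by omega)
      rw [hback, pvRunStart_getD ids toks.length eN (by omega)]
      set s : Int := (pvRStart ids eN : Int) with hs
      have hs0 : 0 ≤ s := by positivity
      by_cases hsc : s ≤ c
      · rw [if_pos (show max c s - 1 < c by omega), if_pos hsc]
      · rw [if_neg (show ¬ max c s - 1 < c by omega), if_neg hsc]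
        congr 1
        omega
    · -- window ends exactly at a sentence boundary: both cut there
      rw [if_neg (fun h => hid h.2), if_pos (Or.inr hid), if_neg (show ¬ e ≤ c by omega)]

lemma stepB_pos (n : Nat) (ids rs : List Int) (c L c' : Int)
    (h : pvStepB n ids rs c L = some c') : c < c' := by
  simp only [pvStepB] at h
  by_cases h1 : min ((n : Int)) (c+L) = (n : Int)
      ∨ PySem.List.pyGetD ids (min ((n : Int)) (c+L)) 0 ≠ PySem.List.pyGetD ids (min ((n : Int)) (c+L) - 1) 0
  · rw [if_pos h1] at h
    by_cases h2 : min ((n : Int)) (c+L) ≤ c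
    · rw [if_pos h2] at h; exact absurd h (by simp)
    · rw [if_neg h2] at h; cases h; omega
  · rw [if_neg h1] at h
    by_cases h2 : PySem.List.pyGetD rs (min ((n : Int)) (c+L) - 1) 0 ≤ c
    · rw [if_pos h2] at h; exact absurd h (by simp)
    · rw [if_neg h2] at h; cases h; omega

lemma loop_eq (toks ids : List Int) (L : Int) (hL : 1 ≤ L) :
    ∀ (fuel : Nat) (c : Int) (segs : List Int), 0 ≤ c →
      pvLoopA toks ids L fuel c segs
        = pvLoopB toks.length ids (pvRunStart ids toks.length) L fuel c segs := by
  intro fuel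
  induction fuel with
  | zero => intro c segs _; rfl
  | succ fuel ih =>
    intro c segs hc
    simp only [pvLoopA, pvLoopB]
    by_cases hcn : c < (toks.length : Int)
    · rw [if_pos hcn, if_pos hcn, ← step_eq toks ids L c hL hc hcn]
      cases hstep : pvStepA toks ids c L with
      | none => rfl
      | some c' =>
        have hc' : c < c' := by
          rw [step_eq toks ids L c hL hc hcn] at hstep
          exact stepB_pos _ _ _ _ _ _ hstep
        exact ih c' (segs ++ [c']) (by omega)
    · rw [if_neg hcn, if_neg hcn]

-- ===== VERDICT (by name: the statement is the Claim_ definition above) =====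
theorem split_doc_into_segments_spec : Claim_equal_split_doc_into_segments := by
  intro toks ids seg wst _hDom hPre
  unfold Spec_split_doc_into_segments
  unfold split_doc_into_segments split_doc_into_segments_alt
  rcases hPre with h0 | ⟨hL, _, _⟩
  · -- empty document: both loops return [0] immediately
    simp [pvLoopA, pvLoopB, h0]
  · exact loop_eq toks ids _ hL (toks.length + 1) 0 [0] le_rfl
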